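-- pv_equiv track=rewrite | github.com/chris4540/algorithm_exercise | hacker-cup/2020/prob_b/solution.py | stone_alchemy
-- ===== SOURCE A (Python) =====
-- def fuse_stones(stones: str) -> str:
--     cnt = {"A": 0, "B": 0}
--
--     for s in stones:
--         cnt[s] += 1
--
--     if cnt["A"] == 0 or cnt["B"] == 0:
--         return "explosion"
--     elif cnt["A"] > cnt["B"]:
--         return "A"
--     elif cnt["A"] < cnt["B"]:
--         return "B"
--
--     raise ValueError("")
--
-- def stone_alchemy(stones: str):
--     n_stones = len(stones)
--
--     if n_stones == 1:
--         return "Y"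
--     elif len(set(stones)) == 1:
--         return "N"
--
--     i = 0
--     result_stones = []
--     while (i < n_stones - 2):
--         result = fuse_stones(stones[i:i+3])
--         if result == "explosion":
--             result_stones.append(stones[i])
--             i += 1
--         else:
--             result_stones.append(result)
--             i += 3
--
--     # add back remainings
--     while (i < n_stones):
--         result_stones.append(stones[i])
--         i += 1
--
--     return stone_alchemy("".join(result_stones))
-- ===== SOURCE B (Python) =====
-- def stone_alchemy(stones: str):
--     # Closed form: each fuse of a mixed triple removes exactly one "A" and one "B",
--     # so #A - #B is invariant; the process ends at one stone iff |#A - #B| == 1.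
--     if len(stones) == 1:
--         return "Y"
--     if len(set(stones)) == 1:
--         return "N"
--     cnt = {"A": 0, "B": 0}
--     for s in stones:
--         cnt[s] += 1
--     d = cnt["A"] - cnt["B"]
--     return "Y" if abs(d) == 1 else "N"
-- ===== Notes on version B (the rewrite author's own statement) =====
-- stated objective: simpler
-- what changed: Replaces the repeated fuse-pass recursion with a single counting pass: the difference between the two stone counts is invariant under every fuse, so after the two base-case checks the answer is 'Y' exactly when that difference has absolute value 1.
import Mathlib
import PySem

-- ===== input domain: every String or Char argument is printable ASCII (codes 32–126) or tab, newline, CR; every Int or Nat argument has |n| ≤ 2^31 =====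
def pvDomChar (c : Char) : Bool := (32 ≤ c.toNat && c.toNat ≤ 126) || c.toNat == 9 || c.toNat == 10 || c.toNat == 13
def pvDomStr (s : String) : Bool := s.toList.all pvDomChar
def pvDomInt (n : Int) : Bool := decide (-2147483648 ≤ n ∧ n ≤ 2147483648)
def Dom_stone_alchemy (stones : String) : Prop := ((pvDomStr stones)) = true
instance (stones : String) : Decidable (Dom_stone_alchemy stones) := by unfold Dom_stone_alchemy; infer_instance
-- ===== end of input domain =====

-- B replaces A's repeated fuse-pass recursion with one counting pass: the count difference is fuse-invariant, so the answer is a closed form (objective: simpler).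

-- ===== PORT A =====
-- fuse_stones: counter dict over the window, then the explosion/majority branches.
-- The 'raise ValueError' fall-through (unreachable on odd A/B windows, i.e. under Pre_) is rendered as "explosion".
def pvFuse (w : List Char) : String :=
  let cnt : PySem.Dict Char Int := PySem.Dict.ofList [('A', 0), ('B', 0)]
  let cnt := w.foldl (fun d c => PySem.Dict.modify d c 0 (· + 1)) cnt
  if PySem.Dict.getD cnt 'A' 0 = 0 ∨ PySem.Dict.getD cnt 'B' 0 = 0 then "explosion"
  else if PySem.Dict.getD cnt 'A' 0 > PySem.Dict.getD cnt 'B' 0 then "A"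
  else if PySem.Dict.getD cnt 'A' 0 < PySem.Dict.getD cnt 'B' 0 then "B"
  else "explosion"

-- the second while loop: add back remainings
def pvTail (s : List Char) (i : Nat) (acc : List Char) : List Char :=
  if i < s.length then pvTail s (i + 1) (acc ++ [s.getD i ' ']) else acc
termination_by s.length - i

-- the first while loop (i < n_stones - 2), then the tail loop
def pvPass (s : List Char) (i : Nat) (acc : List Char) : List Char :=
  if i < s.length - 2 then
    let r := pvFuse ((s.drop i).take 3)   -- stones[i:i+3]
    if r = "explosion" then pvPass s (i + 1) (acc ++ [s.getD i ' '])
    else pvPass s (i + 3) (acc ++ r.toList)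
  else pvTail s i acc
termination_by s.length - i

-- the recursion of stone_alchemy; Python diverges exactly when a pass returns the string
-- unchanged, so the well-foundedness guard 'next.length < s.length' is a pure totality guard
-- (its else-branch is unreachable under Pre_).
def pvGo (s : List Char) : String :=
  if s.length = 1 then "Y"
  else if (PySem.Set.ofList s).length = 1 then "N"
  else
    let next := pvPass s 0 []
    if _h : next.length < s.length then pvGo next else ""
termination_by s.length

def stone_alchemy (stones : String) : String := pvGo stones.toList

-- ===== PORT B =====
-- cnt[s] += 1 over the {'A':0,'B':0} counter; Python's KeyError on a foreign key (unreachable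
-- under Pre_) is rendered by Dict.modify's default, as in pvFuse.
def stone_alchemy_alt (stones : String) : String :=
  let l := stones.toList
  if l.length = 1 then "Y"
  else if (PySem.Set.ofList l).length = 1 then "N"
  else
    let cnt : PySem.Dict Char Int := PySem.Dict.ofList [('A', 0), ('B', 0)]
    let cnt := l.foldl (fun d c => PySem.Dict.modify d c 0 (· + 1)) cnt
    let d := PySem.Dict.getD cnt 'A' 0 - PySem.Dict.getD cnt 'B' 0
    if d.natAbs = 1 then "Y" else "N"

-- ===== PRECONDITION & SPEC =====
-- Pre_ is exactly where the Python A returns: elsewhere it raises (KeyError on a non-'A'/'B'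
-- character inside a mixed string, RecursionError on the empty string and on mixed A/B strings
-- with equal counts, whose reduction never reaches a base case).
def Pre_stone_alchemy (stones : String) : Prop :=
  stones.toList ≠ [] ∧
    (stones.toList.length = 1 ∨
     stones.toList.all (fun c => c == stones.toList.headD 'A') = true ∨
     (stones.toList.all (fun c => c == 'A' || c == 'B') = true ∧
      stones.toList.count 'A' ≠ stones.toList.count 'B'))
instance (stones : String) : Decidable (Pre_stone_alchemy stones) := by
  unfold Pre_stone_alchemy; infer_instance
def pvWitness_stone_alchemy : String := "AAB"

def Spec_stone_alchemy (stones : String) (out : String) : Prop := out = stone_alchemy_alt stones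
instance (stones : String) (out : String) : Decidable (Spec_stone_alchemy stones out) := by
  unfold Spec_stone_alchemy; infer_instance

-- ===== CLAIM (what is proved, stated in full; the proofs are below) =====
def Claim_equal_stone_alchemy : Prop := ∀ (stones : String), Dom_stone_alchemy stones → Pre_stone_alchemy stones → Spec_stone_alchemy stones (stone_alchemy stones)

-- ===== LEMMAS AND PROOFS =====

-- the A/B-count difference, the invariant of a pass
def pvD (l : List Char) : Int := (l.count 'A' : Int) - (l.count 'B' : Int)

def pvAB (l : List Char) : Prop := ∀ c ∈ l, c = 'A' ∨ c = 'B'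

theorem pvD_nil : pvD [] = 0 := by simp [pvD]

theorem pvD_append (l₁ l₂ : List Char) : pvD (l₁ ++ l₂) = pvD l₁ + pvD l₂ := by
  simp [pvD, List.count_append]; ring

-- the 8 possible windows: explosion iff uniform; otherwise a single majority char of equal pvD
set_option maxRecDepth 4096 in
theorem pvFuse_cases (x y z : Char) (hx : x = 'A' ∨ x = 'B') (hy : y = 'A' ∨ y = 'B')
    (hz : z = 'A' ∨ z = 'B') :
    (pvFuse [x, y, z] = "explosion" ∧ x = y ∧ y = z) ∨
    (pvFuse [x, y, z] ≠ "explosion" ∧ (pvFuse [x, y, z] = "A" ∨ pvFuse [x, y, z] = "B") ∧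
     pvD (pvFuse [x, y, z]).toList = pvD [x, y, z] ∧ (pvFuse [x, y, z]).toList.length = 1) := by
  rcases hx with rfl | rfl <;> rcases hy with rfl | rfl <;> rcases hz with rfl | rfl <;>
    first
      | exact Or.inl (by refine ⟨by decide, by decide, by decide⟩)
      | exact Or.inr ⟨by decide, Or.inl (by decide), by decide, by decide⟩
      | exact Or.inr ⟨by decide, Or.inr (by decide), by decide, by decide⟩

theorem pvTail_eq (s : List Char) : ∀ i acc, pvTail s i acc = acc ++ s.drop i := by
  intro i
  induction' hn : s.length - i using Nat.strong_induction_on with n ih generalizing i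
  intro acc
  rw [pvTail]
  split
  · next h =>
    rw [ih (s.length - (i + 1)) (by omega) (i + 1) rfl]
    rw [List.drop_eq_getElem_cons h]
    simp [List.getD_eq_getElem?_getD, List.getElem?_eq_getElem h]
  · next h2 => rw [List.drop_of_length_le (by omega)]; simp

theorem pvDrop_cons (s : List Char) (i : Nat) (h : i < s.length) :
    s.drop i = s.getD i ' ' :: s.drop (i + 1) := by
  rw [List.drop_eq_getElem_cons h, List.getD_eq_getElem?_getD, List.getElem?_eq_getElem h]
  rfl

-- the combined pass invariant: chars stay A/B, pvD is preserved, and the pass either strictly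
-- shrinks (by ≥ 2) or copies the string and certifies every window it saw uniform
theorem pvPass_spec (s : List Char) (hAB : pvAB s) :
    ∀ i acc, pvAB acc →
      pvAB (pvPass s i acc) ∧ pvD (pvPass s i acc) = pvD acc + pvD (s.drop i) ∧
      ((pvPass s i acc).length + 2 ≤ acc.length + (s.length - i) ∨
       (pvPass s i acc = acc ++ s.drop i ∧
        ∀ j, i ≤ j → j + 2 < s.length →
          s.getD j ' ' = s.getD (j + 1) ' ' ∧ s.getD (j + 1) ' ' = s.getD (j + 2) ' ')) := by
  intro i
  induction' hn : s.length - i using Nat.strong_induction_on with n ih generalizing i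
  intro acc hacc
  rw [pvPass]
  split
  · next h =>
    have h2 : i + 2 < s.length := by omega
    have e0 : s.drop i = s.getD i ' ' :: s.drop (i + 1) := pvDrop_cons s i (by omega)
    have e1 : s.drop (i + 1) = s.getD (i + 1) ' ' :: s.drop (i + 2) := pvDrop_cons s (i + 1) (by omega)
    have e2 : s.drop (i + 2) = s.getD (i + 2) ' ' :: s.drop (i + 3) := pvDrop_cons s (i + 2) (by omega)
    have hw : (s.drop i).take 3 = [s.getD i ' ', s.getD (i + 1) ' ', s.getD (i + 2) ' '] := by
      rw [e0, e1, e2]; rfl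
    have hmem : ∀ k, k < s.length → s.getD k ' ' = 'A' ∨ s.getD k ' ' = 'B' := by
      intro k hk
      exact hAB _ (by rw [List.getD_eq_getElem?_getD, List.getElem?_eq_getElem hk]; exact s.getElem_mem hk)
    rcases pvFuse_cases (s.getD i ' ') (s.getD (i + 1) ' ') (s.getD (i + 2) ' ')
        (hmem i (by omega)) (hmem (i + 1) (by omega)) (hmem (i + 2) (by omega)) with
      ⟨hexp, hu1, hu2⟩ | ⟨hne, hab2, hdf, hlf⟩
    · rw [hw, hexp, if_pos rfl]
      have hacc' : pvAB (acc ++ [s.getD i ' ']) := by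
        intro c hc
        rcases List.mem_append.mp hc with hc | hc
        · exact hacc c hc
        · simp at hc; subst hc; exact hmem i (by omega)
      obtain ⟨r1, r2, r3⟩ := ih (s.length - (i + 1)) (by omega) (i + 1) rfl (acc ++ [s.getD i ' ']) hacc'
      have e0' : s.drop i = [s.getD i ' '] ++ s.drop (i + 1) := by rw [e0]; rfl
      refine ⟨r1, ?_, ?_⟩
      · rw [r2, pvD_append, e0', pvD_append]; ring
      · rcases r3 with hlt | ⟨heq, hwin⟩
        · left
          simp only [List.length_append, List.length_cons, List.length_nil] at hlt
          omega
        · right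
          constructor
          · rw [heq, e0', List.append_assoc]
          · intro j hij hj2
            rcases Nat.eq_or_lt_of_le hij with rfl | hlt
            · exact ⟨hu1, hu2⟩
            · exact hwin j (by omega) hj2
    · rw [hw, if_neg hne]
      have hacc' : pvAB (acc ++ (pvFuse [s.getD i ' ', s.getD (i+1) ' ', s.getD (i+2) ' ']).toList) := by
        intro c hc
        rcases List.mem_append.mp hc with hc | hc
        · exact hacc c hc
        · rcases hab2 with hf | hf
          · rw [hf, show ("A" : String).toList = ['A'] from rfl] at hc
            rw [List.mem_singleton.mp hc]; exact Or.inl rfl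
          · rw [hf, show ("B" : String).toList = ['B'] from rfl] at hc
            rw [List.mem_singleton.mp hc]; exact Or.inr rfl
      obtain ⟨r1, r2, r3⟩ := ih (s.length - (i + 3)) (by omega) (i + 3) rfl _ hacc'
      have e012 : s.drop i
          = [s.getD i ' ', s.getD (i + 1) ' ', s.getD (i + 2) ' '] ++ s.drop (i + 3) := by
        rw [e0, e1, e2]; rfl
      refine ⟨r1, ?_, Or.inl ?_⟩
      · rw [r2, pvD_append, hdf, e012, pvD_append]; ring
      · rcases r3 with hlt | ⟨heq, _⟩
        · rw [List.length_append, hlf] at hlt; omega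
        · rw [heq, List.length_append, List.length_append, hlf, List.length_drop]
          omega
  · next h =>
    rw [pvTail_eq]
    refine ⟨?_, by rw [pvD_append], Or.inr ⟨rfl, ?_⟩⟩
    · intro c hc
      rcases List.mem_append.mp hc with hc | hc
      · exact hacc c hc
      · exact hAB c (List.mem_of_mem_drop hc)
    · intro j hij hj2; omega

-- a string all of whose length-3 windows are uniform is uniform (length ≥ 3)
theorem pvUniform_of_windows (s : List Char) (h3 : 3 ≤ s.length)
    (H : ∀ j, j + 2 < s.length →
      s.getD j ' ' = s.getD (j + 1) ' ' ∧ s.getD (j + 1) ' ' = s.getD (j + 2) ' ') :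
    ∀ c ∈ s, c = s.headD 'A' := by
  have adj : ∀ k, k + 1 < s.length → s.getD k ' ' = s.getD (k + 1) ' ' := by
    intro k hk
    by_cases h : k + 2 < s.length
    · exact (H k h).1
    · have := (H (s.length - 3) (by omega)).2
      have e1 : s.length - 3 + 1 = k := by omega
      have e2 : s.length - 3 + 2 = k + 1 := by omega
      rwa [e1, e2] at this
  have base : ∀ k, k < s.length → s.getD k ' ' = s.getD 0 ' ' := by
    intro k
    induction k with
    | zero => intro _; rfl
    | succ m ih => intro hm; rw [← adj m (by omega)]; exact ih (by omega)
  intro c hc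
  obtain ⟨k, hk, rfl⟩ := List.getElem_of_mem hc
  have h1 : s.getD k ' ' = s[k] := by
    rw [List.getD_eq_getElem?_getD, List.getElem?_eq_getElem hk]
    rfl
  have h2 : s.headD 'A' = s.getD 0 ' ' := by
    cases s with
    | nil => simp at h3
    | cons a t => rfl
  rw [← h1, h2]; exact base k hk

-- len(set(s)) == 1 says exactly: nonempty and all chars equal
theorem pvHead_mem (l : List Char) (hne : l ≠ []) : l.headD 'A' ∈ l := by
  cases l with
  | nil => exact absurd rfl hne
  | cons x t => exact List.mem_cons_self

theorem pvSet_len_one (l : List Char) (hne : l ≠ []) :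
    (PySem.Set.ofList l).length = 1 ↔ ∀ c ∈ l, c = l.headD 'A' := by
  constructor
  · intro h1 c hc
    obtain ⟨a, ha⟩ := List.length_eq_one_iff.mp h1
    have hcmem : c ∈ ([a] : List Char) := by
      rw [← ha]; exact (PySem.Set.mem_ofList _ _).mpr hc
    have hh : l.headD 'A' ∈ ([a] : List Char) := by
      rw [← ha]; exact (PySem.Set.mem_ofList _ _).mpr (pvHead_mem l hne)
    rw [List.mem_singleton.mp hcmem, List.mem_singleton.mp hh]
  · intro hall
    have hnd := PySem.Set.nodup_ofList (xs := l)
    have hsub : ∀ c ∈ PySem.Set.ofList l, c = l.headD 'A' := by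
      intro c hc; exact hall c ((PySem.Set.mem_ofList _ _).mp hc)
    have hmem : l.headD 'A' ∈ PySem.Set.ofList l :=
      (PySem.Set.mem_ofList _ _).mpr (pvHead_mem l hne)
    cases hset : PySem.Set.ofList l with
    | nil => rw [hset] at hmem; simp at hmem
    | cons a t =>
      rw [hset] at hnd hsub
      cases t with
      | nil => rfl
      | cons b u =>
        have hab : a = l.headD 'A' := hsub a List.mem_cons_self
        have hbb : b = l.headD 'A' := hsub b (by simp)
        rw [List.nodup_cons] at hnd
        exact absurd (by rw [hab, hbb]; simp) hnd.1

-- B's counter fold computes the two counts, hence pvD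
theorem pvCnt_eq_pvD (l : List Char) :
    (l.foldl (fun d c => PySem.Dict.modify d c 0 (· + 1))
        (PySem.Dict.ofList [('A', (0 : Int)), ('B', 0)])).getD 'A' 0
      - (l.foldl (fun d c => PySem.Dict.modify d c 0 (· + 1))
        (PySem.Dict.ofList [('A', (0 : Int)), ('B', 0)])).getD 'B' 0 = pvD l := by
  rw [PySem.Dict.getD_foldl_modify_add_one, PySem.Dict.getD_foldl_modify_add_one,
    show (PySem.Dict.ofList [('A', (0 : Int)), ('B', 0)]).getD 'A' 0 = 0 from by decide,
    show (PySem.Dict.ofList [('A', (0 : Int)), ('B', 0)]).getD 'B' 0 = 0 from by decide]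
  simp [pvD]

-- B on a list, as a function (proof-side restatement of stone_alchemy_alt's body)
def pvAlt (l : List Char) : String :=
  if l.length = 1 then "Y"
  else if (PySem.Set.ofList l).length = 1 then "N"
  else
    if ((l.foldl (fun d c => PySem.Dict.modify d c 0 (· + 1))
          (PySem.Dict.ofList [('A', (0 : Int)), ('B', 0)])).getD 'A' 0
        - (l.foldl (fun d c => PySem.Dict.modify d c 0 (· + 1))
          (PySem.Dict.ofList [('A', (0 : Int)), ('B', 0)])).getD 'B' 0).natAbs = 1
    then "Y" else "N"

theorem pvAlt_eq (stones : String) : stone_alchemy_alt stones = pvAlt stones.toList := rfl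

theorem pvLen_counts (l : List Char) (hAB : pvAB l) :
    l.length = l.count 'A' + l.count 'B' := by
  induction l with
  | nil => simp
  | cons x t ih =>
    have hx := hAB x List.mem_cons_self
    have ht : pvAB t := fun c hc => hAB c (List.mem_cons_of_mem _ hc)
    rcases hx with rfl | rfl <;>
      simp [ih ht] <;> omega

-- on nonempty A/B strings B is the pure closed form 'if |pvD| = 1 then Y else N'
theorem pvAlt_AB (l : List Char) (hne : l ≠ []) (hAB : pvAB l) :
    pvAlt l = if (pvD l).natAbs = 1 then "Y" else "N" := by
  unfold pvAlt
  rw [pvCnt_eq_pvD l]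
  by_cases h1 : l.length = 1
  · rw [if_pos h1]
    obtain ⟨a, rfl⟩ := List.length_eq_one_iff.mp h1
    rcases hAB a List.mem_cons_self with rfl | rfl
    · norm_num [pvD]
    · norm_num [pvD]
  · rw [if_neg h1]
    by_cases hs : (PySem.Set.ofList l).length = 1
    · rw [if_pos hs]
      have hall := (pvSet_len_one l hne).mp hs
      have hlen1 : 1 ≤ l.length := by
        cases l with
        | nil => exact absurd rfl hne
        | cons x t => simp
      have hne1 : (pvD l).natAbs ≠ 1 := by
        rcases hAB _ (pvHead_mem l hne) with hA | hB
        · have hcA : l.count 'A' = l.length := by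
            rw [List.count_eq_length]; intro b hb; rw [hall b hb, hA]
          have hcB : l.count 'B' = 0 := by
            rw [List.count_eq_zero]; intro hb
            have := hall _ hb; rw [hA] at this; simp at this
          have hD : pvD l = (l.length : Int) := by simp [pvD, hcA, hcB]
          rw [hD]; simp; omega
        · have hcB : l.count 'B' = l.length := by
            rw [List.count_eq_length]; intro b hb; rw [hall b hb, hB]
          have hcA : l.count 'A' = 0 := by
            rw [List.count_eq_zero]; intro hb
            have := hall _ hb; rw [hB] at this; simp at this
          have hD : pvD l = -(l.length : Int) := by simp [pvD, hcA, hcB]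
          rw [hD]; simp; omega
      rw [if_neg hne1]
    · rw [if_neg hs]

-- list-level precondition
def pvPre (l : List Char) : Prop :=
  l ≠ [] ∧ (l.length = 1 ∨ (∀ c ∈ l, c = l.headD 'A') ∨
    (pvAB l ∧ l.count 'A' ≠ l.count 'B'))

theorem pvPre_eq (stones : String) : Pre_stone_alchemy stones ↔ pvPre stones.toList := by
  unfold Pre_stone_alchemy pvPre pvAB
  simp [List.all_eq_true]

-- the main induction: on Pre_, the recursive reduction equals the closed form
theorem pvGo_eq (n : Nat) : ∀ l : List Char, l.length ≤ n → pvPre l → pvGo l = pvAlt l := by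
  induction n with
  | zero =>
    intro l hl hpre
    cases l with
    | nil => exact absurd rfl hpre.1
    | cons x t => simp at hl
  | succ m ih =>
    intro l hl hpre
    obtain ⟨hne, hpre⟩ := hpre
    rw [pvGo]
    by_cases h1 : l.length = 1
    · rw [if_pos h1]; unfold pvAlt; rw [if_pos h1]
    · rw [if_neg h1]
      by_cases hs : (PySem.Set.ofList l).length = 1
      · rw [if_pos hs]; unfold pvAlt; rw [if_neg h1, if_pos hs]
      · rw [if_neg hs]
        have hnsame : ¬ ∀ c ∈ l, c = l.headD 'A' := fun hh => hs ((pvSet_len_one l hne).mpr hh)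
        rcases hpre with h | h | ⟨hAB, hcnt⟩
        · exact absurd h h1
        · exact absurd h hnsame
        have hd : pvD l ≠ 0 := by
          simp only [pvD, sub_ne_zero]; exact_mod_cast hcnt
        obtain ⟨c, hc, hcne⟩ : ∃ c ∈ l, c ≠ l.headD 'A' := by
          by_contra hall
          simp only [not_exists, not_and, not_not] at hall
          exact hnsame hall
        have hh : l.headD 'A' ∈ l := pvHead_mem l hne
        have hmemAB : 'A' ∈ l ∧ 'B' ∈ l := by
          rcases hAB c hc with rfl | rfl
          · rcases hAB _ hh with hA | hB
            · exact absurd hA.symm hcne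
            · exact ⟨hc, hB ▸ hh⟩
          · rcases hAB _ hh with hA | hB
            · exact ⟨hA ▸ hh, hc⟩
            · exact absurd hB.symm hcne
        have hA1 : 0 < l.count 'A' := List.count_pos_iff.mpr hmemAB.1
        have hB1 : 0 < l.count 'B' := List.count_pos_iff.mpr hmemAB.2
        have hlen3 : 3 ≤ l.length := by
          have := pvLen_counts l hAB; omega
        obtain ⟨p1, p2, p3⟩ := pvPass_spec l hAB 0 [] (by intro c hc; simp at hc)
        rw [List.drop_zero, pvD_nil, zero_add] at p2
        have hshrink : (pvPass l 0 []).length < l.length := by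
          rcases p3 with hlt | ⟨_, hwin⟩
          · simp at hlt; omega
          · exact absurd (pvUniform_of_windows l hlen3 (fun j hj => hwin j (Nat.zero_le j) hj)) hnsame
        rw [dif_pos hshrink]
        have hnext_ne : pvPass l 0 [] ≠ [] := by
          intro h0; rw [h0, pvD_nil] at p2; exact hd p2.symm
        have hnext_pre : pvPre (pvPass l 0 []) := by
          refine ⟨hnext_ne, Or.inr (Or.inr ⟨p1, ?_⟩)⟩
          intro hceq
          apply hd
          rw [← p2]
          simp [pvD, hceq]
        rw [ih _ (by omega) hnext_pre]
        rw [pvAlt_AB _ hnext_ne p1, pvAlt_AB _ hne hAB, p2]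

-- ===== VERDICT (by name: the statement is the Claim_ definition above) =====
theorem stone_alchemy_spec : Claim_equal_stone_alchemy := by
  intro stones _ hpre
  unfold Spec_stone_alchemy
  rw [pvAlt_eq]
  exact pvGo_eq stones.toList.length stones.toList le_rfl ((pvPre_eq stones).mp hpre)
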